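-- pv_equiv track=rewrite | github.com/Andrew-InTheBox/Dayz-Expansion-DeerIsle | custom_scripts/remap_di_tiers.py | map_tiers_to_new_system
-- ===== SOURCE A (Python) =====
-- from typing import Set, List
--
-- def map_tiers_to_new_system(old_tiers: Set[int]) -> List[int]:
--     """Map old tiers (1-4) to new tier system (1-9)"""
--     new_tiers = set()
--     for old_tier in old_tiers:
--         if old_tier == 1:
--             new_tiers.add(1)
--         elif old_tier == 2:
--             new_tiers.add(2)
--         elif old_tier == 3:
--             new_tiers.add(3)
--         elif old_tier == 4:
--             new_tiers.update([4, 5, 6, 7, 8, 9])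
--     return sorted(new_tiers)
-- ===== SOURCE B (Python) =====
-- def map_tiers_to_new_system(old_tiers):
--     """Map old tiers (1-4) to new tier system (1-9).
--
--     Scans the new-tier codomain 1..9 in ascending order and emits each new
--     tier whose source old tier (itself for 1-3, 4 for 4-9) is present, so
--     the result comes out sorted with no set and no sort."""
--     return [t for t in range(1, 10) if (t if t <= 3 else 4) in old_tiers]
-- ===== Notes on version B (the rewrite author's own statement) =====
-- stated objective: alternative
-- what changed: Instead of mapping each input element into a set and sorting it, B scans the fixed codomain 1..9 in ascending order and emits each new tier whose source old tier (itself for 1-3, 4 for 4-9) is a member of the input, producing the output already sorted with no set and no sort.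
import Mathlib
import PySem

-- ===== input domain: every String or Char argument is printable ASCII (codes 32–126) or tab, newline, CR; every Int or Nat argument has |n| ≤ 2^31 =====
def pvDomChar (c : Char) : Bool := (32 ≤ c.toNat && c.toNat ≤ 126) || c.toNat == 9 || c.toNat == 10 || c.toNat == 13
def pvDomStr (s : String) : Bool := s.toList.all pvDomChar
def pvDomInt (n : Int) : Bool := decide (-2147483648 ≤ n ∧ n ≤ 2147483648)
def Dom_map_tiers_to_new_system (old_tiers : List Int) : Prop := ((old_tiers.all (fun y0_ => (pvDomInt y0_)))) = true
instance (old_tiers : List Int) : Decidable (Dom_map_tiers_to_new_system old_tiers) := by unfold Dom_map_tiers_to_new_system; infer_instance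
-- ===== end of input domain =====

-- B scans the fixed codomain 1..9 in order, emitting each new tier whose source old tier is present,
-- so the output is built already sorted with no set and no sort; objective: alternative.

-- ===== PORT A =====
def map_tiers_to_new_system (old_tiers : List Int) : List Int :=
  let new_tiers : PySem.Set Int :=
    old_tiers.foldl (fun new_tiers old_tier =>
      if old_tier = 1 then PySem.Set.add new_tiers 1
      else if old_tier = 2 then PySem.Set.add new_tiers 2
      else if old_tier = 3 then PySem.Set.add new_tiers 3
      else if old_tier = 4 then PySem.Set.update new_tiers ([4, 5, 6, 7, 8, 9] : List Int)
      else new_tiers) PySem.Set.empty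
  PySem.List.sorted new_tiers (fun x => x) false

-- ===== PORT B =====
def map_tiers_to_new_system_alt (old_tiers : List Int) : List Int :=
  (PySem.List.pyRange 1 10 1).filter (fun t => decide ((if t ≤ 3 then t else 4) ∈ old_tiers))

-- ===== PRECONDITION & SPEC =====
def Spec_map_tiers_to_new_system (old_tiers : List Int) (out : List Int) : Prop := out = map_tiers_to_new_system_alt old_tiers
instance (old_tiers : List Int) (out : List Int) : Decidable (Spec_map_tiers_to_new_system old_tiers out) := by unfold Spec_map_tiers_to_new_system; infer_instance

-- ===== CLAIM (what is proved, stated in full; the proofs are below) =====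
def Claim_equal_map_tiers_to_new_system : Prop := ∀ (old_tiers : List Int), Dom_map_tiers_to_new_system old_tiers → Spec_map_tiers_to_new_system old_tiers (map_tiers_to_new_system old_tiers)

-- ===== LEMMAS AND PROOFS =====

-- the loop body of A
def pvStepA (s : PySem.Set Int) (t : Int) : PySem.Set Int :=
  if t = 1 then PySem.Set.add s 1
  else if t = 2 then PySem.Set.add s 2
  else if t = 3 then PySem.Set.add s 3
  else if t = 4 then PySem.Set.update s ([4, 5, 6, 7, 8, 9] : List Int)
  else s

theorem pvStepA_nodup (s : PySem.Set Int) (t : Int) (h : s.Nodup) : (pvStepA s t).Nodup := by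
  unfold pvStepA
  split_ifs <;> first
    | exact PySem.Set.nodup_add _ _ h
    | exact PySem.Set.nodup_update _ _ h
    | exact h

theorem pvFoldA_nodup (l : List Int) (s : PySem.Set Int) (h : s.Nodup) :
    (l.foldl pvStepA s).Nodup := by
  induction l generalizing s with
  | nil => exact h
  | cons x xs ih => exact ih _ (pvStepA_nodup s x h)

theorem pvMem_stepA (s : PySem.Set Int) (t y : Int) :
    y ∈ pvStepA s t ↔ y ∈ s ∨ (y = t ∧ (t = 1 ∨ t = 2 ∨ t = 3)) ∨ (t = 4 ∧ y ∈ ([4,5,6,7,8,9] : List Int)) := by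
  unfold pvStepA
  split_ifs with h1 h2 h3 h4
  · subst h1; simp [PySem.Set.mem_add]
  · subst h2; simp [PySem.Set.mem_add]
  · subst h3; simp [PySem.Set.mem_add]
  · subst h4; simp [or_assoc]
  · simp [h1, h2, h3, h4]

theorem pvMem_foldA (l : List Int) (s : PySem.Set Int) (y : Int) :
    y ∈ l.foldl pvStepA s ↔
      y ∈ s ∨ (y ∈ l ∧ (y = 1 ∨ y = 2 ∨ y = 3)) ∨ ((4:Int) ∈ l ∧ y ∈ ([4,5,6,7,8,9] : List Int)) := by
  induction l generalizing s with
  | nil => simp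
  | cons x xs ih =>
    simp only [List.foldl_cons, ih, pvMem_stepA, List.mem_cons]
    constructor
    · rintro ((h | ⟨rfl, h⟩ | ⟨rfl, h⟩) | ⟨hm, hy⟩ | ⟨h4, hy⟩)
      · exact Or.inl h
      · exact Or.inr (Or.inl ⟨Or.inl rfl, h⟩)
      · exact Or.inr (Or.inr ⟨Or.inl rfl, h⟩)
      · exact Or.inr (Or.inl ⟨Or.inr hm, hy⟩)
      · exact Or.inr (Or.inr ⟨Or.inr h4, hy⟩)
    · rintro (h | ⟨(rfl | hm), hy⟩ | ⟨(h4 | h4), hy⟩)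
      · exact Or.inl (Or.inl h)
      · exact Or.inl (Or.inr (Or.inl ⟨rfl, hy⟩))
      · exact Or.inr (Or.inl ⟨hm, hy⟩)
      · exact Or.inl (Or.inr (Or.inr ⟨h4.symm, hy⟩))
      · exact Or.inr (Or.inr ⟨h4, hy⟩)

-- membership in B's candidate-scan output
theorem pvMem_B (l : List Int) (y : Int) :
    y ∈ map_tiers_to_new_system_alt l ↔
      (y ∈ l ∧ (y = 1 ∨ y = 2 ∨ y = 3)) ∨ ((4:Int) ∈ l ∧ y ∈ ([4,5,6,7,8,9] : List Int)) := by
  unfold map_tiers_to_new_system_alt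
  simp only [List.mem_filter, PySem.List.mem_pyRange_one, decide_eq_true_eq]
  constructor
  · rintro ⟨⟨h1, h9⟩, hm⟩
    by_cases h3 : y ≤ 3
    · exact Or.inl ⟨by simpa [h3] using hm, by omega⟩
    · exact Or.inr ⟨by simpa [h3] using hm, by simp; omega⟩
  · rintro (⟨hm, hy⟩ | ⟨h4, hy⟩)
    · refine ⟨by omega, ?_⟩
      have : y ≤ 3 := by omega
      simpa [this] using hm
    · have h9 : 4 ≤ y ∧ y ≤ 9 := by
        simp only [List.mem_cons, List.not_mem_nil, or_false] at hy
        rcases hy with h|h|h|h|h|h <;> omega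
      refine ⟨by omega, ?_⟩
      have : ¬ y ≤ 3 := by omega
      simpa [this] using h4

theorem pvB_pairwise_lt (l : List Int) :
    (map_tiers_to_new_system_alt l).Pairwise (fun a b : Int => a < b) := by
  unfold map_tiers_to_new_system_alt
  exact List.Pairwise.filter _ (PySem.List.pairwise_lt_pyRange_one 1 10)

-- ===== VERDICT (by name: the statement is the Claim_ definition above) =====
theorem map_tiers_to_new_system_spec : Claim_equal_map_tiers_to_new_system := by
  intro old_tiers _
  show map_tiers_to_new_system old_tiers = map_tiers_to_new_system_alt old_tiers
  unfold map_tiers_to_new_system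
  simp only []
  rw [show (fun (new_tiers : PySem.Set Int) (old_tier : Int) =>
        if old_tier = 1 then PySem.Set.add new_tiers 1
        else if old_tier = 2 then PySem.Set.add new_tiers 2
        else if old_tier = 3 then PySem.Set.add new_tiers 3
        else if old_tier = 4 then PySem.Set.update new_tiers ([4, 5, 6, 7, 8, 9] : List Int)
        else new_tiers) = pvStepA from rfl]
  have hperm : (map_tiers_to_new_system_alt old_tiers).Perm (old_tiers.foldl pvStepA PySem.Set.empty) := by
    apply (List.perm_ext_iff_of_nodup ?_ ?_).mpr
    · intro y
      rw [pvMem_B, pvMem_foldA]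
      simp [PySem.Set.empty]
    · exact (pvB_pairwise_lt old_tiers).imp (fun h => ne_of_lt h)
    · exact pvFoldA_nodup _ _ List.nodup_nil
  exact PySem.List.sorted_eq_of_perm_of_pairwise_lt _ _ (fun x : Int => x) hperm (pvB_pairwise_lt old_tiers)
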